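-- pv_equiv track=rewrite | github.com/MrBrantCode/unitest_baseline | mut_generate/mist_train_cf/cf_96513/solution.py | next_n_primes
-- ===== SOURCE A (Python) =====
-- def is_prime(num):
--     if num < 2:
--         return False
--     for i in range(2, int(num ** 0.5) + 1):
--         if num % i == 0:
--             return False
--     return True
--
-- def next_n_primes(n):
--     primes = []
--     num = n + 1
--
--     while len(primes) < n:
--         if is_prime(num):
--             primes.append(num)
--         num += 1
--
--     return primes
-- ===== SOURCE B (Python) =====
-- def next_n_primes(n):
--     if n <= 0:
--         return []
--     limit = 2 * n + 2
--     while True: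
--         # sieve [2..limit] by repeatedly taking the least remaining number
--         # (necessarily prime) and filtering out its multiples
--         nums = list(range(2, limit + 1))
--         primes = []
--         while nums and nums[0] * nums[0] <= limit:
--             p = nums[0]
--             primes.append(p)
--             nums = [x for x in nums[1:] if x % p != 0]
--         primes.extend(nums)
--         result = [p for p in primes if p > n]
--         if len(result) >= n:
--             return result[:n]
--         limit *= 2
-- ===== Notes on version B (the rewrite author's own statement) =====
-- stated objective: alternative
-- what changed: A trial-divides every candidate by every integer up to its square root; B sieves a bounded range (repeatedly filtering out multiples of the least remaining number), doubling the bound until n primes greater than n are collected.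
import Mathlib
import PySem

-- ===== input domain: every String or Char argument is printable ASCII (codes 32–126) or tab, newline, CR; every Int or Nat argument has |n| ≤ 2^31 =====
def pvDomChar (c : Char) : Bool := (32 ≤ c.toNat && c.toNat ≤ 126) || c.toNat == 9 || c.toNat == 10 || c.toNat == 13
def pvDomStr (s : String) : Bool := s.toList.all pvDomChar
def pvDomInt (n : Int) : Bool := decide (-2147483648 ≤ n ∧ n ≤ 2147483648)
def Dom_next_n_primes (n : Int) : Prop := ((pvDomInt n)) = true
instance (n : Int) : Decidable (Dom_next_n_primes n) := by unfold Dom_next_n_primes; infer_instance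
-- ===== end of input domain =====

-- B replaces A's per-candidate trial division (every i up to sqrt, for every candidate) by a
-- bounded-range sieve (repeatedly filter out the multiples of the least remaining number),
-- doubling the bound until n primes > n are found; objective: alternative.

-- ===== PORT A =====
-- is_prime(num): int(num ** 0.5) is ported as Int.sqrt, exact for the magnitudes reached here
def isPrimeA (num : Int) : Bool :=
  if num < 2 then false
  else (PySem.List.pyRange 2 (Int.sqrt num + 1) 1).all (fun i => !(PySem.Int.mod num i == 0))

-- A's `while len(primes) < n` loop, with a fuel bound on the number of iterations; the fuel
-- passed below provably suffices (next_n_primes_spec), so the 0-fuel branch is never the result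
def loopA (n : Int) (fuel : Nat) (primes : List Int) (num : Int) : List Int :=
  match fuel with
  | 0 => primes
  | fuel + 1 =>
    if (primes.length : Int) < n then
      if isPrimeA num then loopA n fuel (primes ++ [num]) (num + 1)
      else loopA n fuel primes (num + 1)
    else primes

def next_n_primes (n : Int) : List Int :=
  loopA n (2 ^ n.toNat * (n.toNat + 2)) [] (n + 1)

-- ===== PORT B =====
-- the inner while loop of Source B (with the trailing primes.extend(nums) folded into its exits)
def sift (limit : Int) (nums : List Int) (primes : List Int) : List Int :=
  match nums with
  | [] => primes
  | p :: rest =>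
    if p * p ≤ limit then
      sift limit (rest.filter (fun x => !(PySem.Int.mod x p == 0))) (primes ++ [p])
    else primes ++ (p :: rest)
termination_by nums.length
decreasing_by simp; exact le_trans (List.length_filter_le _ _) (by simp)

-- Source B's `while True` doubling loop, with a fuel bound on the number of doublings; the fuel
-- passed below provably suffices (next_n_primes_spec), so the 0-fuel branch is never the result
def loopB (n : Int) (fuel : Nat) (limit : Int) : List Int :=
  match fuel with
  | 0 => []
  | fuel + 1 =>
    let nums := PySem.List.pyRange 2 (limit + 1) 1
    let primes := sift limit nums []
    let result := primes.filter (fun p => decide (n < p))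
    if n ≤ (result.length : Int) then result.take n.toNat   -- result[:n]; 1 ≤ n at every call
    else loopB n fuel (2 * limit)

def next_n_primes_alt (n : Int) : List Int :=
  if n ≤ 0 then [] else loopB n (n.toNat + 1) (2 * n + 2)

-- ===== PRECONDITION & SPEC =====
def Spec_next_n_primes (n : Int) (out : List Int) : Prop := out = next_n_primes_alt n
instance (n : Int) (out : List Int) : Decidable (Spec_next_n_primes n out) := by unfold Spec_next_n_primes; infer_instance

-- ===== CLAIM (what is proved, stated in full; the proofs are below) =====
def Claim_equal_next_n_primes : Prop := ∀ (n : Int), Dom_next_n_primes n → Spec_next_n_primes n (next_n_primes n)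

-- ===== LEMMAS AND PROOFS =====

-- prime test on Int used by the correctness statements below
def pB (x : Int) : Bool := decide (Nat.Prime x.toNat)

-- the ascending list of primes in [a, b)
def primesIn (a b : Int) : List Int := (PySem.List.pyRange a b 1).filter pB

theorem isPrimeA_eq (num : Int) :
    isPrimeA num = decide (2 ≤ num ∧ Nat.Prime num.toNat) := by
  unfold isPrimeA
  by_cases h2 : num < 2
  · have hn : ¬ (2 ≤ num ∧ Nat.Prime num.toNat) := fun hc => absurd hc.1 (by omega)
    simp [h2, hn]
  · replace h2 : 2 ≤ num := by omega
    rw [if_neg (by omega)]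
    obtain ⟨m, rfl⟩ : ∃ m : Nat, num = (m : Int) := ⟨num.toNat, by omega⟩
    have hm2 : 2 ≤ m := by exact_mod_cast h2
    have hsq : Int.sqrt (m : Int) = (Nat.sqrt m : Int) := by simp [Int.sqrt]
    rw [Bool.eq_iff_iff]
    simp only [List.all_eq_true, PySem.List.mem_pyRange_one, decide_eq_true_iff, hsq,
      Bool.not_eq_true', beq_eq_false_iff_ne, ne_eq, Int.toNat_natCast]
    constructor
    · intro h
      refine ⟨by exact_mod_cast hm2, Nat.prime_def_le_sqrt.mpr ⟨hm2, ?_⟩⟩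
      intro d hd2 hdle hdvd
      have hmod := h (d : Int) ⟨by exact_mod_cast hd2, by omega⟩
      exact hmod ((PySem.Int.mod_eq_zero_iff_dvd _ _).mpr (Int.natCast_dvd_natCast.mpr hdvd))
    · rintro ⟨-, hp⟩ i ⟨hi2, hile⟩ hmod
      have hdvd : i ∣ (m : Int) := (PySem.Int.mod_eq_zero_iff_dvd _ _).mp hmod
      have hi0 : 0 ≤ i := by omega
      obtain ⟨d, rfl⟩ : ∃ d : Nat, i = (d : Int) := ⟨i.toNat, by omega⟩
      exact (Nat.prime_def_le_sqrt.mp hp).2 d (by exact_mod_cast hi2) (by omega)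
        (Int.natCast_dvd_natCast.mp hdvd)

theorem isPrimeA_eq_pB (num : Int) : isPrimeA num = pB num := by
  rw [isPrimeA_eq]
  unfold pB
  by_cases hp : Nat.Prime num.toNat
  · have h2 : 2 ≤ num := by
      have := hp.two_le
      omega
    simp [hp, h2]
  · simp [hp]

def InvB (limit : Int) (nums : List Int) : Prop :=
  nums.Pairwise (· < ·) ∧ (∀ x ∈ nums, 2 ≤ x ∧ x ≤ limit) ∧
  (∀ x ∈ nums, ¬ Nat.Prime x.toNat → ((x.toNat.minFac : Nat) : Int) ∈ nums)

theorem dvd_toNat_iff {a b : Int} (ha : 0 ≤ a) (hb : 0 ≤ b) : a.toNat ∣ b.toNat ↔ a ∣ b := by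
  rw [← Int.natCast_dvd_natCast, Int.toNat_of_nonneg ha, Int.toNat_of_nonneg hb]

theorem sift_go_fuel (fuel : Nat) (limit : Int) (nums primes : List Int)
    (hf : nums.length ≤ fuel) (hI : InvB limit nums) :
    sift limit nums primes = primes ++ nums.filter pB := by
  induction fuel generalizing nums primes with
  | zero =>
    have : nums = [] := by cases nums <;> simp_all
    subst this; rw [sift]; simp
  | succ fuel IH0 =>
    match nums with
    | [] => rw [sift]; simp
    | p :: rest =>
    by_cases hsq : p * p ≤ limit
    swap
    · obtain ⟨hpw, hbd, hcl⟩ := hI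
      have hall : ∀ x ∈ p :: rest, pB x = true := by
        intro x hx
        by_contra hnpb
        have hnpx : ¬ Nat.Prime x.toNat := by simpa [pB] using hnpb
        have hx2 : 2 ≤ x := (hbd x hx).1
        have hxle : x ≤ limit := (hbd x hx).2
        set q : Int := ((x.toNat.minFac : Nat) : Int) with hqdef
        have hqmem : q ∈ p :: rest := hcl x hx hnpx
        have hpq : p ≤ q := by
          rcases List.mem_cons.mp hqmem with he | hm
          · omega
          · have := (List.pairwise_cons.mp hpw).1 q hm; omega
        have hp2 : 2 ≤ p := (hbd p (by simp)).1
        have hsqle : q * q ≤ x := by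
          have h1 := Nat.minFac_sq_le_self (n := x.toNat) (by omega) hnpx
          have h2 : (x.toNat.minFac * x.toNat.minFac : Nat) ≤ x.toNat := by
            simpa [pow_two] using h1
          have h3 : ((x.toNat.minFac : Nat) : Int) * ((x.toNat.minFac : Nat) : Int) ≤ ((x.toNat : Nat) : Int) := by
            exact_mod_cast h2
          simpa [Int.toNat_of_nonneg (by omega : (0:Int) ≤ x)] using h3
        have : p * p ≤ q * q := mul_le_mul hpq hpq (by omega) (by omega)
        omega
      rw [sift, if_neg hsq]
      rw [List.filter_eq_self.mpr hall]
    obtain ⟨hpw, hbd, hcl⟩ := hI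
    have hp2 : 2 ≤ p := (hbd p (by simp)).1
    have hrest_lt : ∀ x ∈ rest, p < x := by
      intro x hx; exact (List.pairwise_cons.mp hpw).1 x hx
    -- the head of the sieve list is prime
    have hpp : Nat.Prime p.toNat := by
      by_contra hnp
      have hq := hcl p (by simp) hnp
      set q : Int := ((p.toNat.minFac : Nat) : Int) with hqdef
      have hqlt : q < p := by
        have h1 : p.toNat.minFac ≤ p.toNat := Nat.minFac_le (by omega)
        have h2 : p.toNat.minFac ≠ p.toNat := by
          intro he
          exact hnp (he ▸ Nat.minFac_prime (by omega))
        omega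
      rcases List.mem_cons.mp hq with he | hm
      · omega
      · exact absurd hqlt (by have := hrest_lt _ hm; omega)
    -- invariant is preserved by filtering out multiples of p
    have hI' : InvB limit (rest.filter (fun x => !(PySem.Int.mod x p == 0))) := by
      refine ⟨List.Pairwise.sublist List.filter_sublist (List.pairwise_cons.mp hpw).2,
        fun x hx => hbd x (by simp [List.mem_filter.mp hx |>.1]), ?_⟩
      intro x hx hnpx
      obtain ⟨hxr, hxf⟩ := List.mem_filter.mp hx
      have hx2 : 2 ≤ x := (hbd x (by simp [hxr])).1
      have hnd : ¬ (p ∣ x) := by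
        simpa [PySem.Int.mod_eq_zero_iff_dvd] using hxf
      set q : Int := ((x.toNat.minFac : Nat) : Int) with hqdef
      have hqp : Nat.Prime x.toNat.minFac := Nat.minFac_prime (by omega)
      have hq2 : 2 ≤ q := by have := hqp.two_le; omega
      have hqt : q.toNat = x.toNat.minFac := by rw [hqdef]; exact Int.toNat_natCast _
      have hqdvd : q ∣ x := by
        have := Nat.minFac_dvd x.toNat
        have h2 := (dvd_toNat_iff (a := q) (b := x) (by omega) (by omega)).mp (by simpa)
        exact h2
      have hqmem : q ∈ p :: rest := hcl x (by simp [hxr]) hnpx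
      have hqne : q ≠ p := by
        intro he
        exact hnd (he ▸ hqdvd)
      have hqrest : q ∈ rest := by
        rcases List.mem_cons.mp hqmem with he | hm
        · exact absurd he hqne
        · exact hm
      refine List.mem_filter.mpr ⟨hqrest, ?_⟩
      simp only [Bool.not_eq_true', beq_eq_false_iff_ne, ne_eq, PySem.Int.mod_eq_zero_iff_dvd]
      intro hpq
      have : p.toNat ∣ q.toNat := (dvd_toNat_iff (by omega) (by omega)).mpr hpq
      have := (Nat.prime_dvd_prime_iff_eq hpp (by rw [hqt]; exact hqp)).mp this
      exact hqne (by omega)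
    have hflen : (rest.filter (fun x => !(PySem.Int.mod x p == 0))).length ≤ fuel := by
      have := List.length_filter_le (fun x => !(PySem.Int.mod x p == 0)) rest
      simp at hf; omega
    rw [sift, if_pos hsq, IH0 _ _ hflen hI']
    have hfe : (rest.filter (fun x => !(PySem.Int.mod x p == 0))).filter pB = rest.filter pB := by
      rw [List.filter_filter]
      apply List.filter_congr
      intro x hx
      cases hpb : pB x with
      | false => simp
      | true =>
        have hx2 : 2 ≤ x := (hbd x (by simp [hx])).1
        have hxp : Nat.Prime x.toNat := by have := hpb; simp [pB] at this; exact this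
        simp only [Bool.true_and, Bool.and_true, Bool.not_eq_true', beq_eq_false_iff_ne, ne_eq,
          PySem.Int.mod_eq_zero_iff_dvd]
        intro hpd
        have : p.toNat ∣ x.toNat := (dvd_toNat_iff (by omega) (by omega)).mpr hpd
        have := (Nat.prime_dvd_prime_iff_eq hpp hxp).mp this
        have : p = x := by omega
        exact absurd this (by have := hrest_lt x hx; omega)
    rw [hfe]
    have : pB p = true := by simpa [pB] using hpp
    simp [this]

theorem sift_correct (limit : Int) :
    sift limit (PySem.List.pyRange 2 (limit + 1) 1) [] =
      (PySem.List.pyRange 2 (limit + 1) 1).filter pB := by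
  have hI : InvB limit (PySem.List.pyRange 2 (limit + 1) 1) := by
    refine ⟨PySem.List.pairwise_lt_pyRange_one _ _, ?_, ?_⟩
    · intro x hx
      have := (PySem.List.mem_pyRange_one).mp hx
      omega
    · intro x hx hnp
      have hxr := (PySem.List.mem_pyRange_one).mp hx
      have hx2 : 2 ≤ x := by omega
      have hqp : Nat.Prime x.toNat.minFac := Nat.minFac_prime (by omega)
      have h2 : 2 ≤ x.toNat.minFac := hqp.two_le
      have hle : x.toNat.minFac ≤ x.toNat := Nat.minFac_le (by omega)
      exact (PySem.List.mem_pyRange_one).mpr (by omega)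
  exact sift_go_fuel _ limit _ [] le_rfl hI |>.trans (by simp)

theorem resB_eq (n limit : Int) (hn : 0 < n) :
    (sift limit (PySem.List.pyRange 2 (limit + 1) 1) []).filter (fun p => decide (n < p)) =
      primesIn (n + 1) (limit + 1) := by
  unfold primesIn
  rw [sift_correct, List.filter_filter]
  by_cases hle : limit ≤ n
  · rw [PySem.List.pyRange_one_eq_nil (a := n + 1) (by omega)]
    simp only [List.filter_nil, List.filter_eq_nil_iff]
    intro x hx
    have := PySem.List.mem_pyRange_one.mp hx
    simp
    omega
  · rw [PySem.List.pyRange_one_append 2 (n + 1) (limit + 1) (by omega) (by omega),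
      List.filter_append]
    have h1 : (PySem.List.pyRange 2 (n + 1) 1).filter (fun a => decide (n < a) && pB a) = [] := by
      simp only [List.filter_eq_nil_iff]
      intro x hx
      have := PySem.List.mem_pyRange_one.mp hx
      simp
      omega
    have h2 : (PySem.List.pyRange (n + 1) (limit + 1) 1).filter (fun a => decide (n < a) && pB a) =
        (PySem.List.pyRange (n + 1) (limit + 1) 1).filter pB := by
      apply List.filter_congr
      intro x hx
      have := PySem.List.mem_pyRange_one.mp hx
      simp only [Bool.and_eq_right_iff_imp]
      intro
      simp
      omega
    rw [h1, h2]
    simp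

-- take k of the primes in [m, M1) is unchanged by enlarging the window, once it holds k primes
theorem primesIn_take_eq (k : Nat) (m M1 M2 : Int) (h12 : M1 ≤ M2)
    (hk : k ≤ (primesIn m M1).length) :
    (primesIn m M1).take k = (primesIn m M2).take k := by
  unfold primesIn at *
  by_cases hm : m ≤ M1
  · rw [PySem.List.pyRange_one_append m M1 M2 hm h12, List.filter_append,
      List.take_append_of_le_length hk]
  · rw [PySem.List.pyRange_one_eq_nil (by omega)] at hk
    simp at hk
    subst hk
    simp

theorem primesIn_len_le (m M1 M2 : Int) (h12 : M1 ≤ M2) :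
    (primesIn m M1).length ≤ (primesIn m M2).length := by
  unfold primesIn
  by_cases hm : m ≤ M1
  · rw [PySem.List.pyRange_one_append m M1 M2 hm h12, List.filter_append, List.length_append]
    omega
  · rw [PySem.List.pyRange_one_eq_nil (b := M1) (by omega)]
    simp

-- Bertrand's postulate, iterated: [n+1, 2^k*(n+1)] holds at least k primes
theorem primesIn_lower (n : Int) (hn : 1 ≤ n) :
    ∀ k : Nat, (k : Int) ≤ ((primesIn (n + 1) (2 ^ k * (n + 1) + 1)).length : Int) := by
  intro k
  induction k with
  | zero => positivity
  | succ k IH =>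
    have h2k : (0:Int) < 2 ^ k := pow_pos (by norm_num) k
    have hM : n + 1 ≤ 2 ^ k * (n + 1) := by
      have := mul_le_mul_of_nonneg_right (show (1:Int) ≤ 2 ^ k by omega)
        (show (0:Int) ≤ n + 1 by omega)
      omega
    set M : Int := 2 ^ k * (n + 1) with hMdef
    have hmN : ((M.toNat : Nat) : Int) = M := Int.toNat_of_nonneg (by omega)
    obtain ⟨p, hp, hlt, hle⟩ := Nat.bertrand M.toNat (by omega)
    have hsplit : (2:Int) ^ (k + 1) * (n + 1) + 1 = 2 * M + 1 := by
      rw [hMdef]; ring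
    rw [hsplit]
    unfold primesIn at *
    rw [PySem.List.pyRange_one_append (n + 1) (M + 1) (2 * M + 1) (by omega) (by omega),
      List.filter_append, List.length_append]
    have hpmem : ((p : Nat) : Int) ∈ (PySem.List.pyRange (M + 1) (2 * M + 1) 1).filter pB := by
      refine List.mem_filter.mpr ⟨PySem.List.mem_pyRange_one.mpr (by omega), ?_⟩
      simp [pB, hp]
    have := List.length_pos_of_mem hpmem
    push_cast
    omega

-- A's loop, in closed form: it collects the next (n - len) primes its fuel window reaches
theorem loopA_fuel (n : Int) (fuel : Nat) (primes : List Int) (num : Int) :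
    loopA n fuel primes num =
      primes ++ (primesIn num (num + fuel)).take (n - primes.length).toNat := by
  induction fuel generalizing primes num with
  | zero =>
    unfold primesIn
    rw [show num + ((0:Nat) : Int) = num by simp,
      PySem.List.pyRange_one_eq_nil (le_refl num)]
    simp [loopA]
  | succ fuel IH =>
    have hb : num + ((fuel + 1 : Nat) : Int) = (num + 1) + (fuel : Int) := by push_cast; ring
    unfold primesIn at *
    rw [loopA, hb, PySem.List.pyRange_one_cons (by omega)]
    by_cases hlen : (primes.length : Int) < n
    · rw [if_pos hlen]
      by_cases hpr : isPrimeA num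
      · have hpB : pB num = true := by rw [← isPrimeA_eq_pB]; exact hpr
        rw [if_pos hpr, IH, List.filter_cons_of_pos hpB]
        have hk : (n - (primes.length : Int)).toNat =
            (n - ((primes ++ [num]).length : Int)).toNat + 1 := by
          simp
          omega
        rw [hk, List.take_succ_cons]
        simp
      · have hpB : pB num = false := by rw [← isPrimeA_eq_pB]; exact Bool.of_not_eq_true hpr
        rw [if_neg hpr, IH, List.filter_cons_of_neg (by simp [hpB])]
    · rw [if_neg hlen]
      have hz : (n - (primes.length : Int)).toNat = 0 := by omega
      rw [hz]
      simp

theorem loopB_fuel (n : Int) (fuel : Nat) (limit : Int) (hl : 0 < limit) (hn : 0 < n)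
    (hcnt : n ≤ ((primesIn (n + 1) (2 ^ fuel * limit + 1)).length : Int)) :
    loopB n (fuel + 1) limit = (primesIn (n + 1) (2 ^ fuel * limit + 1)).take n.toNat := by
  induction fuel generalizing limit with
  | zero =>
    rw [pow_zero, one_mul] at hcnt ⊢
    have hres := resB_eq n limit hn
    rw [loopB, if_pos (by rw [hres]; exact hcnt)]
    rw [hres]
  | succ fuel IH =>
    have hres := resB_eq n limit hn
    by_cases g : n ≤ ((((sift limit (PySem.List.pyRange 2 (limit + 1) 1) []).filter
        (fun p => decide (n < p))).length : Nat) : Int)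
    · rw [loopB, if_pos g]
      rw [hres] at g ⊢
      apply primesIn_take_eq
      · have h1 : (1:Int) ≤ 2 ^ (fuel + 1) := by
          have := pow_pos (show (0:Int) < 2 by norm_num) (fuel + 1)
          omega
        have := mul_le_mul_of_nonneg_right h1 (le_of_lt hl)
        omega
      · omega
    · rw [loopB, if_neg g]
      have heq : (2:Int) ^ fuel * (2 * limit) = 2 ^ (fuel + 1) * limit := by ring
      have := IH (2 * limit) (by omega) (by rw [heq]; exact hcnt)
      rw [heq] at this
      exact this

-- ===== VERDICT (by name: the statement is the Claim_ definition above) =====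
theorem next_n_primes_spec : Claim_equal_next_n_primes := by
  intro n _
  unfold Spec_next_n_primes next_n_primes next_n_primes_alt
  rw [loopA_fuel]
  by_cases hn : n ≤ 0
  · rw [if_pos hn]
    have hz : (n - (([] : List Int).length : Int)).toNat = 0 := by simp; omega
    rw [hz]
    simp
  · rw [if_neg hn]
    have hn1 : 1 ≤ n := by omega
    have hkn : ((n.toNat : Nat) : Int) = n := Int.toNat_of_nonneg (by omega)
    have h2k : (0:Int) < 2 ^ n.toNat := pow_pos (by norm_num) _
    set MS : Int := 2 ^ n.toNat * (n + 1) + 1 with hMS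
    have hlow : n ≤ ((primesIn (n + 1) MS).length : Int) := by
      have hthis := primesIn_lower n hn1 n.toNat
      rw [← hMS] at hthis
      omega
    -- B's side
    have hMB : MS ≤ 2 ^ n.toNat * (2 * n + 2) + 1 := by
      have := mul_le_mul_of_nonneg_left (show (n+1:Int) ≤ 2*n+2 by omega) (le_of_lt h2k)
      omega
    have hcntB : n ≤ ((primesIn (n + 1) (2 ^ n.toNat * (2 * n + 2) + 1)).length : Int) := by
      have := primesIn_len_le (n + 1) MS (2 ^ n.toNat * (2 * n + 2) + 1) hMB
      omega
    rw [loopB_fuel n n.toNat (2 * n + 2) (by omega) (by omega) hcntB]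
    -- A's side
    have hz : (n - (([] : List Int).length : Int)).toNat = n.toNat := by simp
    rw [hz, List.nil_append]
    have hMA : MS ≤ n + 1 + ((2 ^ n.toNat * (n.toNat + 2) : Nat) : Int) := by
      have hcast : ((2 ^ n.toNat * (n.toNat + 2) : Nat) : Int) = 2 ^ n.toNat * (n + 2) := by
        push_cast [hkn]
        ring
      have := mul_le_mul_of_nonneg_left (show (n+1:Int) ≤ n+2 by omega) (le_of_lt h2k)
      omega
    rw [← primesIn_take_eq n.toNat (n + 1) MS (n + 1 + ((2 ^ n.toNat * (n.toNat + 2) : Nat) : Int)) hMA (by omega),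
      ← primesIn_take_eq n.toNat (n + 1) MS (2 ^ n.toNat * (2 * n + 2) + 1) hMB (by omega)]
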